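-- pv_equiv track=rewrite | github.com/Garito/python-yrest | yrest/utils.py | get_parents_urls
-- ===== SOURCE A (Python) =====
-- from typing import Any, List, Dict, Callable
--
-- def get_parents_urls(url: str) -> List[str]:
--   if url == "/":
--     return None
--
--   urls = []
--   while url:
--     urls.append(url)
--     url = "/".join(url.split("/")[:-1])
--   urls.append("/")
--
--   return urls
-- ===== SOURCE B (Python) =====
-- def get_parents_urls(url: str):
--   if url == "/":
--     return None
--
--   # one left-to-right character scan: each '/' marks an ancestor prefix
--   cands = [url[:i] for i, c in enumerate(url) if c == "/"]
--   cands.append(url)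
--   return [s for s in reversed(cands) if s] + ["/"]
-- ===== Notes on version B (the rewrite author's own statement) =====
-- stated objective: alternative
-- what changed: A repeatedly re-splits and re-joins the shrinking url, stripping one path segment per loop iteration; B makes a single left-to-right character scan collecting the prefix that ends before each slash, then reverses the collected list and filters out the empty prefix.
import Mathlib
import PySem

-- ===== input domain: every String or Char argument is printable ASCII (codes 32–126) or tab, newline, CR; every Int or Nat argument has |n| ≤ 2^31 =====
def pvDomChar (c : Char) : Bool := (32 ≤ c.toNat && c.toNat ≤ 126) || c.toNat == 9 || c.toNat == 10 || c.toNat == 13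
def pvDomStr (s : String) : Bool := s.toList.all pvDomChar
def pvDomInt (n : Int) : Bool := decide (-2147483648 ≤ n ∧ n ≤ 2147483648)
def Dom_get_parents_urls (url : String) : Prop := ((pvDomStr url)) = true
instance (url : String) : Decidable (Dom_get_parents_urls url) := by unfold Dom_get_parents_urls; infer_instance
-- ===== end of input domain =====

-- B replaces A's repeated split/join re-parsing of the shrinking url by ONE left-to-right
-- character scan collecting the prefix before each '/' (objective: alternative decomposition).

-- ===== PORT A =====
-- The helpers/lemmas up to pvParentLenLt are needed by port A itself: its `while url:` loop is a
-- well-founded recursion and needs `len("/".join(url.split("/")[:-1])) < len(url)` for url ≠ "".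

-- plain structural characterization of PySem.Chars.splitOn at separator "/"
def pvSplit : List Char → List (List Char)
  | [] => [[]]
  | c :: r => if c = '/' then [] :: pvSplit r else (pvSplit r).modifyHead (fun h => c :: h)

theorem pvSplit_ne_nil (s : List Char) : pvSplit s ≠ [] := by
  cases s with
  | nil => simp [pvSplit]
  | cons c r =>
    simp only [pvSplit]
    split
    · simp
    · cases h : pvSplit r with
      | nil => exact absurd h (pvSplit_ne_nil r)
      | cons a t => simp

theorem pvGo_eq (fuel : Nat) (l cur : List Char) (acc : List (List Char))
    (h : l.length ≤ fuel) :
    PySem.Chars.splitOn.go ['/'] fuel l cur acc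
      = acc.reverse ++ (pvSplit l).modifyHead (fun t => cur.reverse ++ t) := by
  induction fuel generalizing l cur acc with
  | zero =>
    have hl : l = [] := by cases l <;> simp_all
    subst hl
    simp [PySem.Chars.splitOn.go, pvSplit]
  | succ fuel ih =>
    cases l with
    | nil => simp [PySem.Chars.splitOn.go, pvSplit]
    | cons c rest =>
      by_cases hc : c = '/'
      · subst hc
        have hp : ['/'].isPrefixOf ('/' :: rest) = true := by simp [List.isPrefixOf]
        rw [show PySem.Chars.splitOn.go ['/'] (fuel + 1) ('/' :: rest) cur acc
              = PySem.Chars.splitOn.go ['/'] fuel (List.drop (['/'] : List Char).length ('/' :: rest)) [] (cur.reverse :: acc) by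
              simp [PySem.Chars.splitOn.go, hp]]
        simp only [List.length_cons, List.length_nil, List.drop_succ_cons, List.drop_zero]
        rw [ih rest [] (cur.reverse :: acc) (by simpa using h)]
        obtain ⟨a, t, ht⟩ : ∃ a t, pvSplit rest = a :: t := by
          cases hh : pvSplit rest with
          | nil => exact absurd hh (pvSplit_ne_nil rest)
          | cons a t => exact ⟨a, t, rfl⟩
        simp [pvSplit, ht]
      · have hp : ['/'].isPrefixOf (c :: rest) = false := by
          simp only [List.isPrefixOf, Bool.and_eq_false_iff, beq_eq_false_iff_ne, ne_eq]
          exact Or.inl (fun h => hc h.symm)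
        rw [show PySem.Chars.splitOn.go ['/'] (fuel + 1) (c :: rest) cur acc
              = PySem.Chars.splitOn.go ['/'] fuel rest (c :: cur) acc by
              simp [PySem.Chars.splitOn.go, hp]]
        rw [ih rest (c :: cur) acc (by simpa using Nat.le_of_succ_le_succ h)]
        obtain ⟨a, t, ht⟩ : ∃ a t, pvSplit rest = a :: t := by
          cases hh : pvSplit rest with
          | nil => exact absurd hh (pvSplit_ne_nil rest)
          | cons a t => exact ⟨a, t, rfl⟩
        simp [pvSplit, hc, ht]

theorem pvSplitOn_eq (l : List Char) : PySem.Chars.splitOn l ['/'] = pvSplit l := by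
  unfold PySem.Chars.splitOn
  rw [pvGo_eq (l.length + 1) l [] [] (Nat.le_succ _)]
  obtain ⟨a, t, ht⟩ : ∃ a t, pvSplit l = a :: t := by
    cases hh : pvSplit l with
    | nil => exact absurd hh (pvSplit_ne_nil l)
    | cons a t => exact ⟨a, t, rfl⟩
  simp [ht]

theorem pvJoin_snoc (qs : List (List Char)) (p : List Char) (h : qs ≠ []) :
    PySem.Chars.join ['/'] (qs ++ [p]) = PySem.Chars.join ['/'] qs ++ '/' :: p := by
  induction qs with
  | nil => exact absurd rfl h
  | cons q qs ih =>
    cases qs with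
    | nil => simp [PySem.Chars.join_cons_cons, PySem.Chars.join_singleton]
    | cons q' t =>
      rw [List.cons_append, List.cons_append, PySem.Chars.join_cons_cons,
        ← List.cons_append, ih (by simp), PySem.Chars.join_cons_cons]
      simp

theorem pvJoin_pvSplit (s : List Char) :
    PySem.Chars.join ['/'] (pvSplit s) = s := by
  induction s with
  | nil => simp [pvSplit, PySem.Chars.join_singleton]
  | cons c r ih =>
    obtain ⟨a, t, ht⟩ : ∃ a t, pvSplit r = a :: t := by
      cases hh : pvSplit r with
      | nil => exact absurd hh (pvSplit_ne_nil r)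
      | cons a t => exact ⟨a, t, rfl⟩
    by_cases hc : c = '/'
    · subst hc
      rw [ht] at ih
      simp [pvSplit, ht, PySem.Chars.join_cons_cons, ih]
    · rw [ht] at ih
      cases t with
      | nil =>
        simp [PySem.Chars.join_singleton] at ih
        simp [pvSplit, hc, ht, PySem.Chars.join_singleton, ih]
      | cons b u =>
        rw [PySem.Chars.join_cons_cons] at ih
        simp only [pvSplit, if_neg hc, ht, List.modifyHead_cons]
        rw [PySem.Chars.join_cons_cons, ← ih]
        simp

-- the while-loop body strictly shortens the url: termination of port A's loop
theorem pvParentLenLt (cs : List Char) (h : cs ≠ []) :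
    (PySem.Chars.join ['/']
      (PySem.List.slice (PySem.Chars.splitOn cs ['/']) none (some (-1)))).length < cs.length := by
  rw [pvSplitOn_eq, PySem.List.slice_to_neg_one]
  rcases List.eq_nil_or_concat (pvSplit cs) with hnil | ⟨qs, p, hqs⟩
  · exact absurd hnil (pvSplit_ne_nil cs)
  · have hj : PySem.Chars.join ['/'] (pvSplit cs) = cs := pvJoin_pvSplit cs
    rw [List.concat_eq_append] at hqs
    rw [hqs, List.dropLast_concat]
    by_cases hq : qs = []
    · subst hq
      have : cs.length ≠ 0 := by simpa using h
      simp only [PySem.Chars.join_nil, List.length_nil]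
      omega
    · rw [hqs, pvJoin_snoc qs p hq] at hj
      have : (PySem.Chars.join ['/'] qs ++ '/' :: p).length = cs.length := by rw [hj]
      simp only [List.length_append, List.length_cons] at this
      omega

-- while url: urls.append(url); url = "/".join(url.split("/")[:-1])
def pvLoopA (cs : List Char) : List (List Char) :=
  if h : cs = [] then []
  else cs :: pvLoopA (PySem.Chars.join ['/']
        (PySem.List.slice (PySem.Chars.splitOn cs ['/']) none (some (-1))))
termination_by cs.length
decreasing_by exact pvParentLenLt cs h

def get_parents_urls (url : String) : Option (List String) :=
  if url = "/" then none
  else some ((pvLoopA url.toList).map String.ofList ++ ["/"])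

-- ===== PORT B =====
-- cands = [url[:i] for i, c in enumerate(url) if c == "/"]; cands.append(url)
def pvCands (cs : List Char) : List (List Char) :=
  (((PySem.List.enumerate cs).filter (fun p => p.2 == '/')).map
    (fun p => PySem.Chars.slice cs none (some p.1))) ++ [cs]

-- return [s for s in reversed(cands) if s] + ["/"]
def get_parents_urls_alt (url : String) : Option (List String) :=
  if url = "/" then none
  else some ((((pvCands url.toList).reverse.filter (fun s => !s.isEmpty)).map String.ofList) ++ ["/"])

-- ===== PRECONDITION & SPEC =====
def Spec_get_parents_urls (url : String) (out : Option (List String)) : Prop := out = get_parents_urls_alt url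
instance (url : String) (out : Option (List String)) : Decidable (Spec_get_parents_urls url out) := by unfold Spec_get_parents_urls; infer_instance

-- ===== CLAIM (what is proved, stated in full; the proofs are below) =====
def Claim_equal_get_parents_urls : Prop := ∀ (url : String), Dom_get_parents_urls url → Spec_get_parents_urls url (get_parents_urls url)

-- ===== LEMMAS AND PROOFS =====

-- prefixes of cs that end just before a '/' (what B's comprehension collects), structurally
def pvSP : List Char → List (List Char)
  | [] => []
  | c :: r => (if c = '/' then [[]] else []) ++ (pvSP r).map (fun t => c :: t)

theorem pvSP_noSlash (p : List Char) (h : '/' ∉ p) : pvSP p = [] := by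
  induction p with
  | nil => simp [pvSP]
  | cons c r ih =>
    have hc : ¬ c = '/' := by intro hc; exact h (by simp [hc])
    simp [pvSP, hc, ih (fun hm => h (by simp [hm]))]

theorem pvSP_snoc (u p : List Char) (h : '/' ∉ p) :
    pvSP (u ++ '/' :: p) = pvSP u ++ [u] := by
  induction u with
  | nil => simp [pvSP, pvSP_noSlash p h]
  | cons c u' ih => simp [pvSP, ih, List.map_append]

theorem pvSplit_noSlash_self (p : List Char) (h : '/' ∉ p) : pvSplit p = [p] := by
  induction p with
  | nil => simp [pvSplit]
  | cons c r ih =>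
    have hc : ¬ c = '/' := by intro hc; exact h (by simp [hc])
    simp [pvSplit, hc, ih (fun hm => h (by simp [hm]))]

theorem pvSplit_mem_noSlash (s : List Char) : ∀ t ∈ pvSplit s, '/' ∉ t := by
  induction s with
  | nil => simp [pvSplit]
  | cons c r ih =>
    by_cases hc : c = '/'
    · subst hc
      simpa [pvSplit] using ih
    · obtain ⟨a, t, ht⟩ : ∃ a t, pvSplit r = a :: t := by
        cases hh : pvSplit r with
        | nil => exact absurd hh (pvSplit_ne_nil r)
        | cons a t => exact ⟨a, t, rfl⟩
      rw [ht] at ih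
      simp only [pvSplit, hc, if_false, ht, List.modifyHead_cons]
      intro x hx
      rcases List.mem_cons.mp hx with hx | hx
      · subst hx
        intro hm
        rcases List.mem_cons.mp hm with hm | hm
        · exact hc hm.symm
        · exact ih a (by simp) hm
      · exact ih x (by simp [hx])

theorem pvSplit_append_slash (p v : List Char) (h : '/' ∉ p) :
    pvSplit (p ++ '/' :: v) = p :: pvSplit v := by
  induction p with
  | nil => simp [pvSplit]
  | cons c p' ih =>
    have hc : ¬ c = '/' := by intro hc; exact h (by simp [hc])
    have ih' := ih (fun hm => h (by simp [hm]))
    simp [pvSplit, hc, ih']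

theorem pvSplit_join (ps : List (List Char)) (hne : ps ≠ [])
    (hns : ∀ t ∈ ps, '/' ∉ t) :
    pvSplit (PySem.Chars.join ['/'] ps) = ps := by
  induction ps with
  | nil => exact absurd rfl hne
  | cons p qs ih =>
    cases qs with
    | nil =>
      rw [PySem.Chars.join_singleton]
      exact pvSplit_noSlash_self p (hns p (by simp))
    | cons q t =>
      rw [PySem.Chars.join_cons_cons, List.append_assoc, List.singleton_append,
        pvSplit_append_slash p _ (hns p (by simp)),
        ih (by simp) (fun x hx => hns x (by simp [List.mem_cons] at hx ⊢; tauto))]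

-- B's comprehension over enumerate(url) computes exactly pvSP
theorem pvCands_core (cs pre : List Char) :
    (((PySem.List.enumerate cs (pre.length : Int)).filter (fun p => p.2 == '/')).map
      (fun p => PySem.List.slice (pre ++ cs) none (some p.1)))
      = (pvSP cs).map (fun t => pre ++ t) := by
  induction cs generalizing pre with
  | nil => simp [PySem.List.enumerate_nil, pvSP]
  | cons c r ih =>
    have hshift : ((pre.length : Int) + 1) = (((pre ++ [c]).length : Int)) := by
      simp
    have hrec := ih (pre ++ [c])
    rw [PySem.List.enumerate_cons]
    by_cases hc : c = '/'
    · subst hc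
      have hsl : PySem.List.slice (pre ++ '/' :: r) none (some (pre.length : Int)) = pre := by
        rw [PySem.List.slice_to _ (by positivity)]
        simp [List.take_left (l₁ := pre) (l₂ := '/' :: r)]
      simp only [List.filter_cons, beq_self_eq_true, if_true, List.map_cons, hsl, hshift]
      rw [show pre ++ '/' :: r = (pre ++ ['/']) ++ r by simp]
      rw [hrec]
      simp [pvSP, Function.comp_def]
    · have hcb : ((c == '/') = false) := by simp [hc]
      simp only [List.filter_cons, hcb, Bool.false_eq_true, if_false, hshift]
      rw [show pre ++ c :: r = (pre ++ [c]) ++ r by simp]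
      rw [hrec]
      simp [pvSP, hc, Function.comp_def]

theorem pvCands_eq (cs : List Char) : pvCands cs = pvSP cs ++ [cs] := by
  unfold pvCands
  have h := pvCands_core cs []
  simp only [List.nil_append, List.length_nil, Nat.cast_zero] at h
  simp only [PySem.Chars.slice_eq_listSlice]
  rw [h]
  simp

-- the main invariant: A's shrinking loop output = B's reversed filtered prefix list
theorem pvMain (ps : List (List Char)) (hne : ps ≠ []) (hns : ∀ t ∈ ps, '/' ∉ t) :
    pvLoopA (PySem.Chars.join ['/'] ps)
      = ((pvSP (PySem.Chars.join ['/'] ps) ++ [PySem.Chars.join ['/'] ps]).reverse).filter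
          (fun s => !s.isEmpty) := by
  induction ps using List.reverseRecOn with
  | nil => exact absurd rfl hne
  | append_singleton qs p ih =>
    by_cases hq : qs = []
    · subst hq
      simp only [List.nil_append, PySem.Chars.join_singleton]
      have hsp : pvSP p = [] := pvSP_noSlash p (hns p (by simp))
      by_cases hp : p = []
      · subst hp
        rw [pvLoopA]
        simp [hsp]
      · rw [pvLoopA]
        simp only [hp, dite_false]
        rw [pvSplitOn_eq, PySem.List.slice_to_neg_one,
          pvSplit_noSlash_self p (hns p (by simp))]
        rw [show ([p] : List (List Char)).dropLast = [] from rfl, PySem.Chars.join_nil]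
        rw [pvLoopA]
        simp [hsp, hp]
    · have hj : PySem.Chars.join ['/'] (qs ++ [p]) = PySem.Chars.join ['/'] qs ++ '/' :: p :=
        pvJoin_snoc qs p hq
      have hJne : PySem.Chars.join ['/'] (qs ++ [p]) ≠ [] := by
        rw [hj]; simp
      rw [pvLoopA]
      simp only [hJne, dite_false]
      rw [pvSplitOn_eq, PySem.List.slice_to_neg_one,
        pvSplit_join (qs ++ [p]) (by simp) hns, List.dropLast_concat]
      rw [ih hq (fun x hx => hns x (by simp [hx]))]
      have hsp : pvSP (PySem.Chars.join ['/'] (qs ++ [p]))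
          = pvSP (PySem.Chars.join ['/'] qs) ++ [PySem.Chars.join ['/'] qs] := by
        rw [hj]
        exact pvSP_snoc _ p (hns p (by simp))
      rw [hsp]
      have hJe : (PySem.Chars.join ['/'] (qs ++ [p])).isEmpty = false := by
        cases hh : PySem.Chars.join ['/'] (qs ++ [p]) with
        | nil => exact absurd hh hJne
        | cons a t => simp
      simp [hJe]

theorem pvLoopA_eq (cs : List Char) :
    pvLoopA cs = ((pvCands cs).reverse).filter (fun s => !s.isEmpty) := by
  have h := pvMain (pvSplit cs) (pvSplit_ne_nil cs) (pvSplit_mem_noSlash cs)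
  rw [pvJoin_pvSplit] at h
  rw [h, pvCands_eq]

-- ===== VERDICT (by name: the statement is the Claim_ definition above) =====
theorem get_parents_urls_spec : Claim_equal_get_parents_urls := by
  intro url _
  unfold Spec_get_parents_urls get_parents_urls get_parents_urls_alt
  by_cases hu : url = "/"
  · simp [hu]
  · simp only [hu, if_false]
    rw [pvLoopA_eq]
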